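-- pv_equiv track=rewrite | github.com/itsvisi21/aware_agent | aware-agent-backend/src/semantic_abstraction.py | _create_phrases
-- ===== SOURCE A (Python) =====
-- from typing import List, Dict, Any, Optional, Tuple
--
-- def _create_phrases(tokens: List[str]) -> List[str]:
--     """Combine tokens into meaningful phrases."""
--     phrases = []
--     current_phrase = []
--
--     for token in tokens:
--         if token in [".", ",", "!", "?"]:
--             if current_phrase:
--                 phrases.append(" ".join(current_phrase))
--                 current_phrase = []
--         else:
--             current_phrase.append(token)
--
--     if current_phrase:
--         phrases.append(" ".join(current_phrase))
--
--     return phrases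
-- ===== SOURCE B (Python) =====
-- def _create_phrases(tokens):
--     """Combine tokens into meaningful phrases (two-index run scanner over delimiter cuts)."""
--     delims = {".", ",", "!", "?"}
--     phrases = []
--     i, n = 0, len(tokens)
--     while i < n:
--         if tokens[i] in delims:
--             i += 1
--         else:
--             j = i
--             while j < n and tokens[j] not in delims:
--                 j += 1
--             phrases.append(" ".join(tokens[i:j]))
--             i = j
--     return phrases
-- ===== Notes on version B (the rewrite author's own statement) =====
-- stated objective: alternative
-- what changed: Replaces the accumulate-and-flush pass (current_phrase buffer, flushed on each delimiter and once after the loop) with a two-index run scanner: an outer index skips delimiters and an inner index finds the end of each maximal non-delimiter run, which is sliced out and joined in one step, so there is no phrase buffer and no post-loop flush.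
import Mathlib
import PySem

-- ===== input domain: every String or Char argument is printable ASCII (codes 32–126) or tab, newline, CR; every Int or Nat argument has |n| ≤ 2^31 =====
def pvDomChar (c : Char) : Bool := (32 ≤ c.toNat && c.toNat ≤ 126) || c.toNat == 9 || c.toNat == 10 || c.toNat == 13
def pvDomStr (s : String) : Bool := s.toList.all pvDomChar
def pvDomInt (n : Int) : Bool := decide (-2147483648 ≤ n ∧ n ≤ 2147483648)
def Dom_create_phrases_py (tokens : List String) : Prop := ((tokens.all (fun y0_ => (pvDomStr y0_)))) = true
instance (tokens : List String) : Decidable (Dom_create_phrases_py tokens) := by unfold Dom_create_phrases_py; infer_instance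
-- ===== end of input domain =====

-- B replaces A's accumulate-and-flush buffer with a two-index run scanner (alternative decomposition, same O(n) cost).

-- ===== PORT A =====
-- the literal list [".", ",", "!", "?"] tested by `token in [...]`
def pvDelimsA : List String := [".", ",", "!", "?"]

-- one iteration of A's for-loop over state (phrases, current_phrase)
def pvStepA (st : List String × List String) (token : String) : List String × List String :=
  if pvDelimsA.contains token then
    if st.2 ≠ [] then (st.1 ++ [PySem.Str.join " " st.2], []) else st
  else (st.1, st.2 ++ [token])

def create_phrases_py (tokens : List String) : List String :=
  let st := tokens.foldl pvStepA ([], [])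
  if st.2 ≠ [] then st.1 ++ [PySem.Str.join " " st.2] else st.1

-- ===== PORT B =====
-- delims = {".", ",", "!", "?"} (a Python set)
def pvDelimsB : PySem.Set String := PySem.Set.ofList [".", ",", "!", "?"]

def pvIsDelimB (t : String) : Bool := PySem.Set.contains pvDelimsB t

-- inner while loop: `while j < n and tokens[j] not in delims: j += 1`
-- (tokens.getD j "" is exact: it is only consulted under j < n = tokens.length)
def pvScanRun (tokens : List String) (n j : Nat) : Nat :=
  if h : j < n ∧ ¬ pvIsDelimB (tokens.getD j "") = true then pvScanRun tokens n (j + 1) else j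
termination_by n - j
decreasing_by omega

-- the inner while loop never moves j backwards (termination of the outer loop cites this)
theorem pvScanRun_ge (tokens : List String) (n j : Nat) : j ≤ pvScanRun tokens n j := by
  rw [pvScanRun]
  split
  · have := pvScanRun_ge tokens n (j + 1); omega
  · omega
termination_by n - j
decreasing_by omega

-- outer while loop: `while i < n`, skipping delimiters, else slicing out the run tokens[i:j]
def pvOuter (tokens : List String) (n i : Nat) : List String :=
  if h : i < n then
    if hd : pvIsDelimB (tokens.getD i "") then pvOuter tokens n (i + 1)
    else
      let j := pvScanRun tokens n i
      PySem.Str.join " " (PySem.List.slice tokens (some (i : Int)) (some (j : Int))) ::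
        pvOuter tokens n j
  else []
termination_by n - i
decreasing_by
  · omega
  · have h1 : i + 1 ≤ pvScanRun tokens n i := by
      rw [pvScanRun, dif_pos ⟨h, by simpa using hd⟩]
      exact pvScanRun_ge tokens n (i + 1)
    omega

def create_phrases_py_alt (tokens : List String) : List String :=
  pvOuter tokens tokens.length 0

-- ===== PRECONDITION & SPEC =====
def Spec_create_phrases_py (tokens : List String) (out : List String) : Prop := out = create_phrases_py_alt tokens
instance (tokens : List String) (out : List String) : Decidable (Spec_create_phrases_py tokens out) := by unfold Spec_create_phrases_py; infer_instance

-- ===== CLAIM (what is proved, stated in full; the proofs are below) =====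
def Claim_equal_create_phrases_py : Prop := ∀ (tokens : List String), Dom_create_phrases_py tokens → Spec_create_phrases_py tokens (create_phrases_py tokens)

-- ===== LEMMAS AND PROOFS =====

-- prefix/suffix facts about takeWhile/dropWhile used to read off the run tokens[i:j]
theorem pv_len_tw {α : Type} (p : α → Bool) (l : List α) : (l.takeWhile p).length ≤ l.length := by
  have hl := congrArg List.length (List.takeWhile_append_dropWhile (p := p) (l := l))
  simp only [List.length_append] at hl
  omega

theorem pv_take_tw {α : Type} (p : α → Bool) (l : List α) :
    l.take ((l.takeWhile p).length) = l.takeWhile p :=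
  (List.prefix_iff_eq_take.mp (List.takeWhile_prefix p)).symm

theorem pv_drop_tw {α : Type} (p : α → Bool) (l : List α) :
    l.drop ((l.takeWhile p).length) = l.dropWhile p := by
  have hs := List.suffix_iff_eq_drop.mp (List.dropWhile_suffix p (l := l))
  have hl := congrArg List.length (List.takeWhile_append_dropWhile (p := p) (l := l))
  simp only [List.length_append] at hl
  rw [hs]
  congr 1
  omega

-- common recursive description of both programs: pvCont cur xs = phrases still to be emitted
-- given pending buffer cur and remaining tokens xs
def pvCont (cur : List String) : List String → List String
  | [] => if cur = [] then [] else [PySem.Str.join " " cur]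
  | t :: ts =>
    if pvIsDelimB t then
      if cur = [] then pvCont [] ts else PySem.Str.join " " cur :: pvCont [] ts
    else pvCont (cur ++ [t]) ts

theorem pv_delim_mem (t : String) : t ∈ pvDelimsA ↔ pvIsDelimB t = true := by
  simp [pvIsDelimB, pvDelimsB, pvDelimsA, PySem.Set.mem_ofList]

-- A's foldl-with-flush computes pvCont
theorem pv_A_cont (tokens : List String) : ∀ (phrases cur : List String),
    (let st := tokens.foldl pvStepA (phrases, cur);
     if st.2 ≠ [] then st.1 ++ [PySem.Str.join " " st.2] else st.1) = phrases ++ pvCont cur tokens := by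
  induction tokens with
  | nil =>
    intro phrases cur
    simp only [List.foldl_nil, pvCont]
    by_cases hc : cur = [] <;> simp [hc]
  | cons t ts ih =>
    intro phrases cur
    simp only [List.foldl_cons]
    by_cases hd : pvIsDelimB t
    · by_cases hc : cur = []
      · simp [pvStepA, pv_delim_mem, hd, hc, pvCont, ih]
      · simp [pvStepA, pv_delim_mem, hd, hc, pvCont, ih]
    · simp [pvStepA, pv_delim_mem, hd, pvCont, ih]

-- with a nonempty buffer, pvCont emits the buffer extended by the current run, then restarts
theorem pv_cont_run (xs : List String) : ∀ (cur : List String), cur ≠ [] →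
    pvCont cur xs =
      PySem.Str.join " " (cur ++ xs.takeWhile (fun x => !pvIsDelimB x)) ::
        pvCont [] (xs.dropWhile (fun x => !pvIsDelimB x)) := by
  induction xs with
  | nil => intro cur hc; simp [pvCont, hc]
  | cons t ts ih =>
    intro cur hc
    by_cases hd : pvIsDelimB t
    · simp [pvCont, hd, hc]
    · simp only [pvCont, hd, if_false, Bool.false_eq_true,
        List.takeWhile_cons, List.dropWhile_cons, Bool.not_false, if_true]
      rw [ih (cur ++ [t]) (by simp)]
      simp

theorem pv_scan_spec (tokens : List String) (n j : Nat) (hn : n = tokens.length) (hj : j ≤ n) :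
    pvScanRun tokens n j = j + ((tokens.drop j).takeWhile (fun x => !pvIsDelimB x)).length := by
  rw [pvScanRun]
  split
  · next h =>
    obtain ⟨h1, h2⟩ := h
    have hg : tokens.drop j = tokens[j] :: tokens.drop (j + 1) :=
      List.drop_eq_getElem_cons (by omega)
    have hget : tokens.getD j "" = tokens[j] := List.getD_eq_getElem _ _ (by omega)
    rw [pv_scan_spec tokens n (j + 1) hn (by omega), hg, List.takeWhile_cons]
    rw [hget] at h2
    simp only [h2]
    simp; omega
  · next h =>
    by_cases hjn : j < n
    · have h2 : pvIsDelimB (tokens.getD j "") = true := by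
        by_contra hco; exact h ⟨hjn, hco⟩
      have hg : tokens.drop j = tokens[j] :: tokens.drop (j + 1) :=
        List.drop_eq_getElem_cons (by omega)
      have hget : tokens.getD j "" = tokens[j] := List.getD_eq_getElem _ _ (by omega)
      rw [hg, List.takeWhile_cons]
      rw [hget] at h2
      simp [h2]
    · have : j = n := by omega
      subst this hn
      simp
termination_by n - j
decreasing_by omega

theorem pv_outer_cont_aux (k : Nat) : ∀ (tokens : List String) (n i : Nat), n - i ≤ k →
    n = tokens.length → i ≤ n → pvOuter tokens n i = pvCont [] (tokens.drop i) := by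
  induction k with
  | zero =>
    intro tokens n i hk hn hi
    rw [pvOuter, dif_neg (by omega)]
    have : i = n := by omega
    subst this hn
    simp [pvCont]
  | succ k ih =>
    intro tokens n i hk hn hi
    rw [pvOuter]
    split
    case isFalse h =>
      have : i = n := by omega
      subst this hn
      simp [pvCont]
    case isTrue h =>
        have hg : tokens.drop i = tokens[i] :: tokens.drop (i + 1) :=
          List.drop_eq_getElem_cons (by omega)
        have hget : tokens.getD i "" = tokens[i] := List.getD_eq_getElem _ _ (by omega)
        by_cases hd : pvIsDelimB (tokens.getD i "")
        · rw [dif_pos hd, ih tokens n (i + 1) (by omega) hn (by omega), hg, pvCont]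
          rw [hget] at hd
          simp [hd]
        · rw [dif_neg hd]
          show PySem.Str.join " " (PySem.List.slice tokens (some (i : Int)) (some ((pvScanRun tokens n i) : Int))) ::
              pvOuter tokens n (pvScanRun tokens n i) = pvCont [] (tokens.drop i)
          have hscan : pvScanRun tokens n i =
              i + ((tokens.drop i).takeWhile (fun x => !pvIsDelimB x)).length :=
            pv_scan_spec tokens n i hn (by omega)
          have hlen : ((tokens.drop i).takeWhile (fun x => !pvIsDelimB x)).length ≤ (tokens.drop i).length :=
            pv_len_tw _ _
          have hjn : pvScanRun tokens n i ≤ n := by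
            rw [hscan]; have := List.length_drop (l := tokens) (i := i); omega
        -- slice tokens[i:j] is exactly the takeWhile run
          have hslice : PySem.List.slice tokens (some (i : Int)) (some ((pvScanRun tokens n i) : Int)) =
              (tokens.drop i).takeWhile (fun x => !pvIsDelimB x) := by
            rw [PySem.List.slice_natCast, hscan]
            have : i + ((tokens.drop i).takeWhile (fun x => !pvIsDelimB x)).length - i
                = ((tokens.drop i).takeWhile (fun x => !pvIsDelimB x)).length := by omega
            rw [this]
            exact pv_take_tw _ _
          have hdrop : tokens.drop (pvScanRun tokens n i) =
              (tokens.drop i).dropWhile (fun x => !pvIsDelimB x) := by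
            rw [hscan, ← List.drop_drop]
            exact pv_drop_tw _ _
          have h1 : i + 1 ≤ pvScanRun tokens n i := by
            rw [pvScanRun, dif_pos ⟨h, by simpa using hd⟩]
            exact pvScanRun_ge tokens n (i + 1)
          rw [ih tokens n (pvScanRun tokens n i) (by omega) hn hjn, hslice, hdrop, hg, pvCont]
          rw [hget] at hd
          simp only [hd, if_false, Bool.false_eq_true]
          simp only [List.nil_append]
          rw [pv_cont_run _ [tokens[i]] (by simp)]
          have hp : (!pvIsDelimB tokens[i]) = true := by simp [hd]
          simp only [List.takeWhile_cons, List.dropWhile_cons, hp, if_true, List.cons_append,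
            List.nil_append]

theorem pv_outer_cont (tokens : List String) (n i : Nat) (hn : n = tokens.length) (hi : i ≤ n) :
    pvOuter tokens n i = pvCont [] (tokens.drop i) :=
  pv_outer_cont_aux (n - i) tokens n i le_rfl hn hi

-- ===== VERDICT (by name: the statement is the Claim_ definition above) =====
theorem create_phrases_py_spec : Claim_equal_create_phrases_py := by
  intro tokens _
  unfold Spec_create_phrases_py create_phrases_py create_phrases_py_alt
  rw [pv_A_cont tokens [] [], pv_outer_cont tokens tokens.length 0 rfl (by omega)]
  exact rfl
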